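-- pv_equiv track=rewrite | github.com/josesalopasog/Courses | Curso_Python/Interfaces/Funciones/Interaccion_Funciones.py | reducir_lista
-- ===== SOURCE A (Python) =====
-- def reducir_lista(lista):
--     lista_nueva = []
--     for n in lista:
--         if n not in lista_nueva:
--             lista_nueva.append(n)
--         elif n in lista_nueva:
--             pass
--     lista_nueva.sort()
--     lista_nueva.pop(-1)
--     return lista_nueva
-- ===== SOURCE B (Python) =====
-- def reducir_lista(lista):
--     u = []
--     for x in sorted(lista):
--         if not u or u[-1] != x:
--             u.append(x)
--     u.pop()
--     return u
-- ===== Notes on version B (the rewrite author's own statement) =====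
-- stated objective: faster
-- what changed: B sorts first and deduplicates by comparing each element with the last kept one in a single pass, instead of A's per-element membership scan over the growing result list followed by a sort.
-- outside the precondition, e.g. on reducir_lista([]): A raises IndexError, B raises IndexError
import Mathlib
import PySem

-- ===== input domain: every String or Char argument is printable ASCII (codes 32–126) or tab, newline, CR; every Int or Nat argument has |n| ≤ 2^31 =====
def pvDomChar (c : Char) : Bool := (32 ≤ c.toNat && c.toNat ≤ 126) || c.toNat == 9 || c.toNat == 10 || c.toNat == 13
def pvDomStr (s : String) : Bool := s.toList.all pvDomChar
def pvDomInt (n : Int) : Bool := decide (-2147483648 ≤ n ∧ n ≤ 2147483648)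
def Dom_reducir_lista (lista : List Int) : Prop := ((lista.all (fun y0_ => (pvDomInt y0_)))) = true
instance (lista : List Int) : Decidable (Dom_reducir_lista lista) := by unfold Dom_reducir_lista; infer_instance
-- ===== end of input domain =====

-- B sorts first and deduplicates adjacent elements in one pass (O(n log n)) instead of A's
-- per-element membership scan over the growing result (O(n^2)); return values agree on all
-- nonempty lists (both raise IndexError on []).

-- ===== PORT A =====
def reducir_lista (lista : List Int) : List Int :=
  let lista_nueva := lista.foldl (fun acc n => if ¬ (acc.contains n) then acc ++ [n] else acc) []
  let s := PySem.List.sorted lista_nueva (fun x => x)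
  match PySem.List.pop? s (-1) with
  | some (_, rest) => rest
  | none => []  -- Python raises IndexError here; excluded by Pre_

-- ===== PORT B =====
def reducir_lista_alt (lista : List Int) : List Int :=
  let u := (PySem.List.sorted lista (fun x => x)).foldl
    (fun acc x => if acc = [] ∨ acc.getLast? ≠ some x then acc ++ [x] else acc) []
  match PySem.List.pop? u (-1) with
  | some (_, rest) => rest
  | none => []  -- Python raises IndexError here; excluded by Pre_

-- ===== PRECONDITION & SPEC =====
-- Pre_ excludes only the empty list, on which both Python programs raise IndexError (pop from empty list).
def Pre_reducir_lista (lista : List Int) : Prop := lista ≠ []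
instance (lista : List Int) : Decidable (Pre_reducir_lista lista) := by unfold Pre_reducir_lista; infer_instance
def pvWitness_reducir_lista : List Int := ([1, 2, 2, 0])

def Spec_reducir_lista (lista : List Int) (out : List Int) : Prop := out = reducir_lista_alt lista
instance (lista : List Int) (out : List Int) : Decidable (Spec_reducir_lista lista out) := by unfold Spec_reducir_lista; infer_instance

-- ===== CLAIM (what is proved, stated in full; the proofs are below) =====
def Claim_equal_reducir_lista : Prop := ∀ (lista : List Int), Dom_reducir_lista lista → Pre_reducir_lista lista → Spec_reducir_lista lista (reducir_lista lista)

-- ===== LEMMAS AND PROOFS =====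

-- A's accumulation loop is exactly Python set-of-list accumulation (first occurrences kept).
lemma foldA_eq_ofList (lista : List Int) :
    lista.foldl (fun acc n => if ¬ (acc.contains n) then acc ++ [n] else acc) [] =
      PySem.Set.ofList lista := by
  have hfun : (fun (acc : List Int) n => if ¬ (acc.contains n) then acc ++ [n] else acc) =
      PySem.Set.add := by
    funext acc n
    simp [PySem.Set.add, ite_not]
  rw [hfun]
  rfl

-- In a strictly increasing list, an element bounding all others from above is the last one.
lemma getLast?_of_max : ∀ (acc : List Int) (x : Int), acc.Pairwise (· < ·) → x ∈ acc →
    (∀ a ∈ acc, a ≤ x) → acc.getLast? = some x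
  | [], x, _, hx, _ => by simp at hx
  | a :: t, x, hp, hx, hle => by
    cases t with
    | nil => simp at hx ⊢; omega
    | cons b t' =>
      have hp' := List.pairwise_cons.mp hp
      have hxt : x ∈ b :: t' := by
        rcases List.mem_cons.mp hx with h | h
        · exfalso
          have h1 : a < b := hp'.1 b (List.mem_cons_self ..)
          have h2 : b ≤ x := hle b (by simp)
          omega
        · exact h
      have := getLast?_of_max (b :: t') x hp'.2 hxt (fun y hy => hle y (List.mem_cons_of_mem _ hy))
      simpa [List.getLast?_cons_cons] using this

-- Invariant of B's adjacency-dedup fold over a weakly increasing list.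
lemma adj_fold_invariant : ∀ (s acc : List Int), s.Pairwise (· ≤ ·) → acc.Pairwise (· < ·) →
    (∀ a ∈ acc, ∀ x ∈ s, a ≤ x) →
    (s.foldl (fun acc x => if acc = [] ∨ acc.getLast? ≠ some x then acc ++ [x] else acc) acc).Pairwise (· < ·) ∧
    (∀ y, y ∈ s.foldl (fun acc x => if acc = [] ∨ acc.getLast? ≠ some x then acc ++ [x] else acc) acc ↔ y ∈ acc ∨ y ∈ s)
  | [], acc, _, hacc, _ => ⟨hacc, by simp⟩
  | x :: t, acc, hs, hacc, hle => by
    have hs' := List.pairwise_cons.mp hs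
    simp only [List.foldl_cons]
    by_cases hc : acc = [] ∨ acc.getLast? ≠ some x
    · rw [if_pos hc]
      have hlt : ∀ a ∈ acc, a < x := by
        intro a ha
        have hax : a ≤ x := hle a ha x (by simp)
        rcases lt_or_eq_of_le hax with h | h
        · exact h
        · exfalso
          subst h
          have hlast := getLast?_of_max acc a hacc ha (fun b hb => hle b hb a (by simp))
          rcases hc with h | h
          · simp [h] at ha
          · exact h hlast
      have hacc' : (acc ++ [x]).Pairwise (· < ·) := by
        rw [List.pairwise_append]
        exact ⟨hacc, by simp, by simpa using hlt⟩
      have hle' : ∀ a ∈ acc ++ [x], ∀ b ∈ t, a ≤ b := by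
        intro a ha b hb
        rcases List.mem_append.mp ha with h | h
        · exact hle a h b (List.mem_cons_of_mem _ hb)
        · simp at h; subst h; exact hs'.1 b hb
      obtain ⟨h1, h2⟩ := adj_fold_invariant t (acc ++ [x]) hs'.2 hacc' hle'
      refine ⟨h1, fun y => ?_⟩
      rw [h2 y]
      simp [or_assoc, or_comm, or_left_comm]
    · rw [if_neg hc]
      push_neg at hc
      have hxacc : x ∈ acc := by
        have := List.mem_of_getLast? (l := acc) (a := x)
        exact this hc.2
      have hle' : ∀ a ∈ acc, ∀ b ∈ t, a ≤ b := fun a ha b hb => hle a ha b (List.mem_cons_of_mem _ hb)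
      obtain ⟨h1, h2⟩ := adj_fold_invariant t acc hs'.2 hacc hle'
      refine ⟨h1, fun y => ?_⟩
      rw [h2 y]
      constructor
      · rintro (h | h)
        · exact Or.inl h
        · exact Or.inr (List.mem_cons_of_mem _ h)
      · rintro (h | h)
        · exact Or.inl h
        · rcases List.mem_cons.mp h with h | h
          · subst h; exact Or.inl hxacc
          · exact Or.inr h

-- The two pre-pop lists coincide: sorted(A's dedup) = B's adjacency dedup of sorted input.
lemma pre_pop_eq (lista : List Int) :
    PySem.List.sorted (lista.foldl (fun acc n => if ¬ (acc.contains n) then acc ++ [n] else acc) []) (fun x => x) =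
      (PySem.List.sorted lista (fun x => x)).foldl
        (fun acc x => if acc = [] ∨ acc.getLast? ≠ some x then acc ++ [x] else acc) [] := by
  rw [foldA_eq_ofList]
  set BL := (PySem.List.sorted lista (fun x => x)).foldl
      (fun acc x => if acc = [] ∨ acc.getLast? ≠ some x then acc ++ [x] else acc) [] with hBL
  have hsorted : (PySem.List.sorted lista (fun x => x)).Pairwise (· ≤ ·) :=
    PySem.List.sorted_pairwise lista (fun x => x)
  obtain ⟨hpw, hmem⟩ := adj_fold_invariant (PySem.List.sorted lista (fun x => x)) []
    hsorted (by simp) (by simp)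
  have hnodupBL : BL.Nodup := hpw.imp ne_of_lt
  have hmemBL : ∀ y, y ∈ BL ↔ y ∈ PySem.Set.ofList lista := by
    intro y
    rw [hBL, hmem y, PySem.Set.mem_ofList]
    simp [PySem.List.mem_sorted]
  have hperm : BL.Perm (PySem.Set.ofList lista) :=
    (List.perm_ext_iff_of_nodup hnodupBL (PySem.Set.nodup_ofList lista)).mpr hmemBL
  exact PySem.List.sorted_eq_of_perm_of_pairwise_lt _ BL (fun x => x) hperm hpw

-- ===== VERDICT (by name: the statement is the Claim_ definition above) =====
theorem reducir_lista_spec : Claim_equal_reducir_lista := by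
  intro lista _ _
  unfold Spec_reducir_lista reducir_lista reducir_lista_alt
  simp only [pre_pop_eq lista]
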